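-- pv_equiv track=rewrite | github.com/Flamehood/NYU_CS1134 | hw4/sks684_hw4_q5.py | is_number_of_lowercase_even
-- ===== SOURCE A (Python) =====
-- def is_number_of_lowercase_even(s, low, high):
--     if high < low:
--         return None
--     prev = is_number_of_lowercase_even(s, low+1, high)
--     curr = s[low].islower()
--     if prev is None:
--         return not(curr)
--     if curr is True:
--         return not(prev)
--     else:
--         return prev
-- ===== SOURCE B (Python) =====
-- def is_number_of_lowercase_even(s, low, high):
--     if high < low:
--         return None
--     count = 0
--     for i in range(low, high + 1):
--         count += s[i].islower()
--     return count % 2 == 0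
-- ===== Notes on version B (the rewrite author's own statement) =====
-- stated objective: simpler
-- what changed: Replaced A's recursion, which threads an Optional boolean bottom-up and toggles it per lowercase character, by a single iterative loop that counts lowercase characters over range(low, high+1) and returns the parity of the count (None kept for an empty range).
import Mathlib
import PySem

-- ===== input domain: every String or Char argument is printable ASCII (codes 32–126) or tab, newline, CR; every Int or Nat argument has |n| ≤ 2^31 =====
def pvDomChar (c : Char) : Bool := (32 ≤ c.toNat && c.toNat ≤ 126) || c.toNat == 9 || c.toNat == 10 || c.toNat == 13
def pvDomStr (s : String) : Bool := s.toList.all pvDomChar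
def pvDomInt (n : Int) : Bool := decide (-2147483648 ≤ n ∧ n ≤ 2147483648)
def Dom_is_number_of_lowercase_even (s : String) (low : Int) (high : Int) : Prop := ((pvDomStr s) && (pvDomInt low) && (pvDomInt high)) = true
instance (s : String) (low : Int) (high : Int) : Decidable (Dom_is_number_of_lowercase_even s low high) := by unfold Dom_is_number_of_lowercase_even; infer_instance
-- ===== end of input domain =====

-- B replaces A's recursion (which toggles a boolean bottom-up) by a single iterative
-- count of lowercase characters followed by one parity test; objective: simpler.

-- ===== PORT A =====
-- Literal port of A's recursion; on an out-of-range index Python raises IndexError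
-- (pyGet? = none) — such inputs are outside Pre_; the port uses curr = false there.
def is_number_of_lowercase_even (s : String) (low : Int) (high : Int) : Option Bool :=
  if high < low then none
  else
    let prev := is_number_of_lowercase_even s (low + 1) high
    let curr := match PySem.Str.pyGet? s low with
      | some c => PySem.Chars.islower c
      | none => false
    match prev with
    | none => some (!curr)
    | some p => if curr then some (!p) else some p
termination_by (high + 1 - low).toNat
decreasing_by omega

-- ===== PORT B =====
-- port of Source B: count = 0; for i in range(low, high+1): count += s[i].islower(); return count % 2 == 0
def is_number_of_lowercase_even_alt (s : String) (low : Int) (high : Int) : Option Bool :=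
  if high < low then none
  else
    let count : Int := (PySem.List.pyRange low (high + 1) 1).foldl
      (fun acc i => acc + (match PySem.Str.pyGet? s i with
        | some c => if PySem.Chars.islower c then (1 : Int) else 0
        | none => 0)) 0
    some (count % 2 == 0)

-- ===== PRECONDITION & SPEC =====
-- Pre_ excludes exactly the inputs where Python A raises IndexError: a nonempty
-- range [low, high] with an endpoint outside the valid (possibly negative) index range.
def Pre_is_number_of_lowercase_even (s : String) (low : Int) (high : Int) : Prop :=
  high < low ∨ (PySem.Raise.InRange s.toList.length low ∧ PySem.Raise.InRange s.toList.length high)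
instance (s : String) (low : Int) (high : Int) : Decidable (Pre_is_number_of_lowercase_even s low high) := by unfold Pre_is_number_of_lowercase_even; infer_instance

def pvWitness_is_number_of_lowercase_even : String × Int × Int := ("aBc d", 1, 4)

def Spec_is_number_of_lowercase_even (s : String) (low : Int) (high : Int) (out : Option Bool) : Prop := out = is_number_of_lowercase_even_alt s low high
instance (s : String) (low : Int) (high : Int) (out : Option Bool) : Decidable (Spec_is_number_of_lowercase_even s low high out) := by unfold Spec_is_number_of_lowercase_even; infer_instance

-- ===== CLAIM (what is proved, stated in full; the proofs are below) =====
def Claim_equal_is_number_of_lowercase_even : Prop := ∀ (s : String) (low : Int) (high : Int), Dom_is_number_of_lowercase_even s low high → Pre_is_number_of_lowercase_even s low high → Spec_is_number_of_lowercase_even s low high (is_number_of_lowercase_even s low high)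

-- ===== LEMMAS AND PROOFS =====

-- per-index contribution shared by both ports
def pvLc (s : String) (i : Int) : Int :=
  match PySem.Str.pyGet? s i with
  | some c => if PySem.Chars.islower c then (1 : Int) else 0
  | none => 0

theorem pvFoldl_add_init (s : String) (l : List Int) (init : Int) :
    l.foldl (fun acc i => acc + pvLc s i) init = init + l.foldl (fun acc i => acc + pvLc s i) 0 := by
  induction l generalizing init with
  | nil => simp
  | cons x xs ih =>
    simp only [List.foldl_cons]
    rw [ih (init + pvLc s x), ih (0 + pvLc s x)]
    ring

-- A computes the parity of the lowercase count over [low, high]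
theorem pvA_eq_parity (s : String) (low high : Int) (h : ¬ high < low) :
    is_number_of_lowercase_even s low high =
      some ((((PySem.List.pyRange low (high + 1) 1).foldl (fun acc i => acc + pvLc s i) 0) % 2) == 0) := by
  generalize hn : (high + 1 - low).toNat = n
  induction n generalizing low with
  | zero => omega
  | succ n ih =>
    rw [is_number_of_lowercase_even, if_neg h]
    rw [PySem.List.pyRange_one_cons (by omega : low < high + 1)]
    simp only [List.foldl_cons]
    rw [pvFoldl_add_init]
    by_cases h2 : high < low + 1
    · -- low = high : the recursive call returns none
      have hprev : is_number_of_lowercase_even s (low + 1) high = none := by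
        rw [is_number_of_lowercase_even, if_pos h2]
      rw [hprev]
      rw [PySem.List.pyRange_one_eq_nil (by omega : high + 1 ≤ low + 1)]
      rcases hg : PySem.Str.pyGet? s low with _ | c
      · have hl : pvLc s low = 0 := by simp only [pvLc]; rw [hg]
        simp only [hl]; simp
      · by_cases hc : PySem.Chars.islower c
        · have hl : pvLc s low = 1 := by simp only [pvLc]; rw [hg]; simp [hc]
          simp only [hc, hl]; simp
        · have hl : pvLc s low = 0 := by simp only [pvLc]; rw [hg]; simp [hc]
          simp only [hl]; simp [hc]
    · rw [ih (low + 1) h2 (by omega)]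
      rcases hg : PySem.Str.pyGet? s low with _ | c
      · have hl : pvLc s low = 0 := by simp only [pvLc]; rw [hg]
        simp only [hl]; simp
      · by_cases hc : PySem.Chars.islower c
        · have hl : pvLc s low = 1 := by simp only [pvLc]; rw [hg]; simp [hc]
          simp only [hc, hl, if_true, Option.some.injEq]
          generalize (PySem.List.pyRange (low + 1) (high + 1) 1).foldl (fun acc i => acc + pvLc s i) 0 = m
          rcases Int.emod_two_eq_zero_or_one m with hm2 | hm2 <;> simp [hm2] <;> omega
        · have hl : pvLc s low = 0 := by simp only [pvLc]; rw [hg]; simp [hc]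
          simp only [hl]; simp [hc]

theorem pvLc_fold_eq (s : String) (l : List Int) :
    l.foldl (fun acc i => acc + (match PySem.Str.pyGet? s i with
        | some c => if PySem.Chars.islower c then (1 : Int) else 0
        | none => 0)) 0 = l.foldl (fun acc i => acc + pvLc s i) 0 := rfl

-- ===== VERDICT (by name: the statement is the Claim_ definition above) =====
theorem is_number_of_lowercase_even_spec : Claim_equal_is_number_of_lowercase_even := by
  intro s low high _ _
  unfold Spec_is_number_of_lowercase_even
  by_cases h : high < low
  · rw [is_number_of_lowercase_even, if_pos h, is_number_of_lowercase_even_alt, if_pos h]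
  · rw [pvA_eq_parity s low high h, is_number_of_lowercase_even_alt, if_neg h]
    simp only [pvLc_fold_eq]
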